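-- pv_equiv track=rewrite | github.com/Albond87/Advent-of-Code | 2021/Puzzle03.2.py | filterNums
-- ===== SOURCE A (Python) =====
-- def filterNums(nums,pos,least):
--     split = [[],[]]
--     for i in nums:
--         split[int(i[pos])].append(i)
--
--     zeros = len(split[0])
--     ones = len(split[1])
--     mostRet = 1
--     if zeros > ones:
--         mostRet = 0
--     return split[least-mostRet]
-- ===== SOURCE B (Python) =====
-- def filterNums(nums, pos, least):
--     # Count the two bit values instead of materialising both partitions,
--     # then keep the order by filtering the input once.
--     counts = [0, 0]
--     for i in nums:
--         counts[int(i[pos])] += 1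
--     mostRet = 0 if counts[0] > counts[1] else 1
--     bit = (least - mostRet) % 2
--     return [i for i in nums if int(i[pos]) == bit]
-- ===== Notes on version B (the rewrite author's own statement) =====
-- stated objective: alternative
-- what changed: B replaces the partition-building pass (two appended lists, then indexing the pair) by a counting pass over two integers plus one order-preserving filter of the input, computing the kept bit arithmetically as (least-mostRet) % 2.
import Mathlib
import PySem

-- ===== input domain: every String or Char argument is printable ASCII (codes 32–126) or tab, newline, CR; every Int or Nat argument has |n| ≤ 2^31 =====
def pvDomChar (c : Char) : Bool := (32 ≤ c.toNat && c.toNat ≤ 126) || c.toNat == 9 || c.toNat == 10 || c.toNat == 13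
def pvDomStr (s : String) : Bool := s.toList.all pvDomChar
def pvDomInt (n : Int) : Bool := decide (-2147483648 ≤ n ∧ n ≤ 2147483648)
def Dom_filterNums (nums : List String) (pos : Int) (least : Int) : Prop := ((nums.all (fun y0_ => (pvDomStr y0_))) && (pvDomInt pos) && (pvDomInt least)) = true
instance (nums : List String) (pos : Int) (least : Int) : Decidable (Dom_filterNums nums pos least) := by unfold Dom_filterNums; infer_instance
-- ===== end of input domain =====

-- B trades A's partition-building pass for a counting pass plus one filter (objective: alternative, same cost).

-- int(i[pos]) : the digit value of the character of i at Python index pos (none = IndexError/ValueError)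
def pyDigit (i : String) (pos : Int) : Option Int :=
  (PySem.Str.pyGet? i pos).bind fun c => PySem.Int.ofChars? [c]

-- ===== PORT A =====
-- loop body: split[int(i[pos])].append(i)
def stepA (pos : Int) (split : List (List String)) (i : String) : List (List String) :=
  match pyDigit i pos with
  | some d =>
    match PySem.List.pyIdx? split.length d with
    | some n => split.modify n (fun l => l ++ [i])
    | none => split            -- Python raises IndexError here (outside Pre_)
  | none => split              -- Python raises ValueError/IndexError here (outside Pre_)

def filterNums (nums : List String) (pos : Int) (least : Int) : List String :=
  let split : List (List String) := nums.foldl (stepA pos) [[], []]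
  let zeros : Int := (((PySem.List.pyGet? split 0).getD []).length : Int)
  let ones : Int := (((PySem.List.pyGet? split 1).getD []).length : Int)
  let mostRet : Int := if zeros > ones then 0 else 1
  (PySem.List.pyGet? split (least - mostRet)).getD []   -- Python raises IndexError when none (outside Pre_)

-- ===== PORT B =====
-- loop body: counts[int(i[pos])] += 1
def stepB (pos : Int) (counts : List Int) (i : String) : List Int :=
  match pyDigit i pos with
  | some d =>
    match PySem.List.pyIdx? counts.length d with
    | some n => counts.modify n (· + 1)
    | none => counts           -- Python raises IndexError here (outside Pre_)
  | none => counts             -- Python raises ValueError/IndexError here (outside Pre_)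

def filterNums_alt (nums : List String) (pos : Int) (least : Int) : List String :=
  let counts : List Int := nums.foldl (stepB pos) [0, 0]
  let mostRet : Int :=
    if (PySem.List.pyGet? counts 0).getD 0 > (PySem.List.pyGet? counts 1).getD 0 then 0 else 1
  let bit : Int := PySem.Int.mod (least - mostRet) 2
  nums.filter (fun i => pyDigit i pos == some bit)

-- ===== PRECONDITION & SPEC =====
-- Pre_ excludes exactly the inputs on which A raises: some string's character at pos is not '0'/'1'
-- (ValueError/IndexError in the loop), or least - mostRet falls outside the two-element list
-- (IndexError): least must lie in {-1,0,1}, or be ±2 on the matching side of the majority count.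
def Pre_filterNums (nums : List String) (pos : Int) (least : Int) : Prop :=
  (∀ s ∈ nums, PySem.Str.pyGet? s pos = some '0' ∨ PySem.Str.pyGet? s pos = some '1')
  ∧ (least = -1 ∨ least = 0 ∨ least = 1
     ∨ (least = 2 ∧ ¬ nums.countP (fun s => PySem.Str.pyGet? s pos == some '0')
                      > nums.countP (fun s => PySem.Str.pyGet? s pos == some '1'))
     ∨ (least = -2 ∧ nums.countP (fun s => PySem.Str.pyGet? s pos == some '0')
                      > nums.countP (fun s => PySem.Str.pyGet? s pos == some '1')))
instance (nums : List String) (pos : Int) (least : Int) : Decidable (Pre_filterNums nums pos least) := by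
  unfold Pre_filterNums; infer_instance

def pvWitness_filterNums : List String × Int × Int := (["10", "11", "01"], 0, 1)

def Spec_filterNums (nums : List String) (pos : Int) (least : Int) (out : List String) : Prop := out = filterNums_alt nums pos least
instance (nums : List String) (pos : Int) (least : Int) (out : List String) : Decidable (Spec_filterNums nums pos least out) := by unfold Spec_filterNums; infer_instance

-- ===== CLAIM (what is proved, stated in full; the proofs are below) =====
def Claim_equal_filterNums : Prop := ∀ (nums : List String) (pos : Int) (least : Int), Dom_filterNums nums pos least → Pre_filterNums nums pos least → Spec_filterNums nums pos least (filterNums nums pos least)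

-- ===== LEMMAS AND PROOFS =====

lemma pyDigit_of_good {i : String} {pos : Int}
    (h : PySem.Str.pyGet? i pos = some '0' ∨ PySem.Str.pyGet? i pos = some '1') :
    pyDigit i pos = some 0 ∨ pyDigit i pos = some 1 := by
  rcases h with h | h
  · left; simp only [pyDigit, h]; decide
  · right; simp only [pyDigit, h]; decide

lemma stepA_zero {pos : Int} {i : String} (h : pyDigit i pos = some 0) (a b : List String) :
    stepA pos [a, b] i = [a ++ [i], b] := by
  simp [stepA, h, PySem.List.pyIdx?, List.modify, List.modifyTailIdx]
  rfl

lemma stepA_one {pos : Int} {i : String} (h : pyDigit i pos = some 1) (a b : List String) :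
    stepA pos [a, b] i = [a, b ++ [i]] := by
  norm_num [stepA, h, PySem.List.pyIdx?, List.modify, List.modifyTailIdx]
  rfl

lemma stepB_zero {pos : Int} {i : String} (h : pyDigit i pos = some 0) (x y : Int) :
    stepB pos [x, y] i = [x + 1, y] := by
  simp [stepB, h, PySem.List.pyIdx?, List.modify, List.modifyTailIdx]
  rfl

lemma stepB_one {pos : Int} {i : String} (h : pyDigit i pos = some 1) (x y : Int) :
    stepB pos [x, y] i = [x, y + 1] := by
  norm_num [stepB, h, PySem.List.pyIdx?, List.modify, List.modifyTailIdx]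
  rfl

-- A's loop: the two partitions are order-preserving filters of the input.
lemma loopA (pos : Int) (nums : List String)
    (h : ∀ s ∈ nums, PySem.Str.pyGet? s pos = some '0' ∨ PySem.Str.pyGet? s pos = some '1')
    (a b : List String) :
    nums.foldl (stepA pos) [a, b]
    = [a ++ nums.filter (fun i => pyDigit i pos == some 0),
       b ++ nums.filter (fun i => pyDigit i pos == some 1)] := by
  induction nums generalizing a b with
  | nil => simp
  | cons x xs ih =>
    have hxs : ∀ s ∈ xs, PySem.Str.pyGet? s pos = some '0' ∨ PySem.Str.pyGet? s pos = some '1' :=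
      fun s hs => h s (by simp [hs])
    rcases pyDigit_of_good (h x (by simp)) with hx | hx
    · rw [List.foldl_cons, stepA_zero hx, ih hxs]
      simp [hx]
    · rw [List.foldl_cons, stepA_one hx, ih hxs]
      simp [hx]

-- B's loop: the two counters are the lengths of those filters.
lemma loopB (pos : Int) (nums : List String)
    (h : ∀ s ∈ nums, PySem.Str.pyGet? s pos = some '0' ∨ PySem.Str.pyGet? s pos = some '1')
    (x y : Int) :
    nums.foldl (stepB pos) [x, y]
    = [x + ((nums.filter (fun i => pyDigit i pos == some 0)).length : Int),
       y + ((nums.filter (fun i => pyDigit i pos == some 1)).length : Int)] := by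
  induction nums generalizing x y with
  | nil => simp
  | cons z zs ih =>
    have hzs : ∀ s ∈ zs, PySem.Str.pyGet? s pos = some '0' ∨ PySem.Str.pyGet? s pos = some '1' :=
      fun s hs => h s (by simp [hs])
    rcases pyDigit_of_good (h z (by simp)) with hz | hz
    · rw [List.foldl_cons, stepB_zero hz, ih hzs]
      simp [hz]; omega
    · rw [List.foldl_cons, stepB_one hz, ih hzs]
      simp [hz]; omega

-- selecting from the 2-element list, for the four in-range indices
lemma pyGet2_zero {α : Type} (u v : α) : PySem.List.pyGet? [u, v] (0 : Int) = some u := by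
  norm_num [PySem.List.pyGet?, PySem.List.pyIdx?]
lemma pyGet2_one {α : Type} (u v : α) : PySem.List.pyGet? [u, v] (1 : Int) = some v := by
  norm_num [PySem.List.pyGet?, PySem.List.pyIdx?]
lemma pyGet2_neg_one {α : Type} (u v : α) : PySem.List.pyGet? [u, v] (-1 : Int) = some v := by
  norm_num [PySem.List.pyGet?, PySem.List.pyIdx?]
lemma pyGet2_neg_two {α : Type} (u v : α) : PySem.List.pyGet? [u, v] (-2 : Int) = some u := by
  norm_num [PySem.List.pyGet?, PySem.List.pyIdx?]

-- counting a bit via the character equals counting it via pyDigit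
lemma count_eq (pos : Int) (nums : List String) (c : Char) (d : Int) (hcd : ∀ s ∈ nums, (PySem.Str.pyGet? s pos == some c) = (pyDigit s pos == some d)) :
    nums.countP (fun s => PySem.Str.pyGet? s pos == some c)
      = (nums.filter (fun i => pyDigit i pos == some d)).length := by
  rw [← List.countP_eq_length_filter]
  refine List.countP_congr (fun x hx => ?_)
  rw [hcd x hx]

lemma count0_eq (pos : Int) (nums : List String)
    (h : ∀ s ∈ nums, PySem.Str.pyGet? s pos = some '0' ∨ PySem.Str.pyGet? s pos = some '1') :
    nums.countP (fun s => PySem.Str.pyGet? s pos == some '0')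
      = (nums.filter (fun i => pyDigit i pos == some 0)).length := by
  refine count_eq pos nums '0' 0 (fun s hs => ?_)
  rcases h s hs with hc | hc <;> simp only [pyDigit, hc] <;> decide

lemma count1_eq (pos : Int) (nums : List String)
    (h : ∀ s ∈ nums, PySem.Str.pyGet? s pos = some '0' ∨ PySem.Str.pyGet? s pos = some '1') :
    nums.countP (fun s => PySem.Str.pyGet? s pos == some '1')
      = (nums.filter (fun i => pyDigit i pos == some 1)).length := by
  refine count_eq pos nums '1' 1 (fun s hs => ?_)
  rcases h s hs with hc | hc <;> simp only [pyDigit, hc] <;> decide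

-- ===== VERDICT (by name: the statement is the Claim_ definition above) =====
theorem filterNums_spec : Claim_equal_filterNums := by
  intro nums pos least _hdom hpre
  obtain ⟨hgood, hleast⟩ := hpre
  unfold Spec_filterNums filterNums filterNums_alt
  rw [loopA pos nums hgood, loopB pos nums hgood]
  simp only [List.nil_append, zero_add, pyGet2_zero, pyGet2_one, Option.getD_some]
  have m0 : ((-3 : Int)).fmod 2 = 1 := by decide
  have m1 : ((-2 : Int)).fmod 2 = 0 := by decide
  have m2 : ((-1 : Int)).fmod 2 = 1 := by decide
  have m3 : ((0 : Int)).fmod 2 = 0 := by decide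
  have m4 : ((1 : Int)).fmod 2 = 1 := by decide
  have hc0 := count0_eq pos nums hgood
  have hc1 := count1_eq pos nums hgood
  rcases hleast with h | h | h | ⟨h, hc⟩ | ⟨h, hc⟩ <;> subst h <;>
    [skip; skip; skip;
     (rw [hc0, hc1] at hc;
      have hgt : ¬ ((nums.filter (fun i => pyDigit i pos == some 0)).length : Int)
          > ((nums.filter (fun i => pyDigit i pos == some 1)).length : Int) := by
        push_cast; omega);
     (rw [hc0, hc1] at hc;
      have hgt : ((nums.filter (fun i => pyDigit i pos == some 0)).length : Int)
          > ((nums.filter (fun i => pyDigit i pos == some 1)).length : Int) := by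
        push_cast; omega)]
  case _ | _ | _ =>
    by_cases hgt : ((nums.filter (fun i => pyDigit i pos == some 0)).length : Int)
        > ((nums.filter (fun i => pyDigit i pos == some 1)).length : Int) <;>
      norm_num [hgt, pyGet2_zero, pyGet2_one, pyGet2_neg_one, pyGet2_neg_two,
        PySem.Int.mod, m0, m1, m2, m3, m4]
  all_goals
    norm_num [hgt, pyGet2_zero, pyGet2_one, pyGet2_neg_one, pyGet2_neg_two,
      PySem.Int.mod, m0, m1, m2, m3, m4]
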